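-- pv_equiv track=rewrite | github.com/miliar/Code_Jam_Webscraper | solutions_python/solutions_year10_round0_nr3/669.py | solve
-- ===== SOURCE A (Python) =====
-- def solve(R, k, g):
--     euros = 0
--     for i in range(R):
--         s = 0
--         for i, x in enumerate(g):
--             if s + x > k:
--                 break
--             s += x
--         euros += s
--         g = g[i:] + g[:i]
--     return euros
-- ===== SOURCE B (Python) =====
-- def solve(R, k, g):
--     n = len(g)
--     if n == 0 or R <= 0:
--         return 0
--     # Memoize one greedy round per starting offset, then replay R rounds in O(1) each.
--     earn = []
--     nxt = []
--     for off in range(n):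
--         row = g[off:] + g[:off]
--         s = 0
--         i = n - 1
--         for j, x in enumerate(row):
--             if s + x > k:
--                 i = j
--                 break
--             s += x
--         earn.append(s)
--         nxt.append((off + i) % n)
--     total = 0
--     off = 0
--     for _ in range(R):
--         total += earn[off]
--         off = nxt[off]
--     return total
-- ===== Notes on version B (the rewrite author's own statement) =====
-- stated objective: alternative
-- what changed: B precomputes each starting offset's greedy earnings and next offset once (a memo table over the n rotation states) and then replays the R rounds as table lookups, instead of rescanning and re-slicing the current list every round; it trades A's O(R*n) round loop for an O(n^2) table build plus an O(R) replay.
import Mathlib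
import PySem

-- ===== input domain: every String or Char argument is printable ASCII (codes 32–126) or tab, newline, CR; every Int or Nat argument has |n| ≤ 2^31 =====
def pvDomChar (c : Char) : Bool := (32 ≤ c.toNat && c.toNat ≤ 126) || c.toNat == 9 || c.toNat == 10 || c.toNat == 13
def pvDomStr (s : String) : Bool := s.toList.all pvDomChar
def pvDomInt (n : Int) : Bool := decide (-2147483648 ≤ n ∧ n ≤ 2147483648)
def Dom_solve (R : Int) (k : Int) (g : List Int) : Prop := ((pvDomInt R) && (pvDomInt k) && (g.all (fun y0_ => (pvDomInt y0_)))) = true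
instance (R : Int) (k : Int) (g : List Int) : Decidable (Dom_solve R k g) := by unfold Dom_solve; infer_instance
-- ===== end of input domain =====

-- B memoizes each starting offset's greedy round (earnings, next offset) once, then replays
-- the R rounds as table steps; A rescans and re-slices the list every round (return value equivalence).

-- ===== PORT A =====
-- inner 'for i, x in enumerate(g): if s + x > k: break; s += x' (i carried across iterations)
def innerA (k : Int) : List (Int × Int) → Int → Int → Int × Int
  | [], s, i => (s, i)
  | (j, x) :: rest, s, _ => if s + x > k then (s, j) else innerA k rest (s + x) j

def solve (R : Int) (k : Int) (g : List Int) : Int :=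
  ((PySem.List.pyRange 0 R 1).foldl (fun (st : Int × List Int) i =>
      let p := innerA k (PySem.List.enumerate st.2 0) 0 i
      (st.1 + p.1, PySem.List.slice st.2 (some p.2) none ++ PySem.List.slice st.2 none (some p.2)))
    (0, g)).1

-- ===== PORT B =====
-- inner 'for j, x in enumerate(row): if s + x > k: i = j; break; s += x' (none = no break, i stays n-1)
def rowScan (k : Int) : List (Int × Int) → Int → Int × Option Int
  | [], s => (s, none)
  | (j, x) :: rest, s => if s + x > k then (s, some j) else rowScan k rest (s + x)

def solve_alt (R : Int) (k : Int) (g : List Int) : Int :=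
  let n : Int := g.length
  if g.length = 0 ∨ R ≤ 0 then 0
  else
    let tab := (PySem.List.pyRange 0 n 1).foldl (fun (t : List Int × List Int) off =>
        let row := PySem.List.slice g (some off) none ++ PySem.List.slice g none (some off)
        let p := rowScan k (PySem.List.enumerate row 0) 0
        let i := p.2.getD (n - 1)
        (t.1 ++ [p.1], t.2 ++ [PySem.Int.mod (off + i) n])) ([], [])
    ((PySem.List.pyRange 0 R 1).foldl (fun (st : Int × Int) _ =>
        (st.1 + PySem.List.pyGetD tab.1 st.2 0, PySem.List.pyGetD tab.2 st.2 0)) ((0 : Int), (0 : Int))).1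

-- ===== PRECONDITION & SPEC =====
def Spec_solve (R : Int) (k : Int) (g : List Int) (out : Int) : Prop := out = solve_alt R k g
instance (R : Int) (k : Int) (g : List Int) (out : Int) : Decidable (Spec_solve R k g out) := by unfold Spec_solve; infer_instance

-- ===== CLAIM (what is proved, stated in full; the proofs are below) =====
def Claim_equal_solve : Prop := ∀ (R : Int) (k : Int) (g : List Int), Dom_solve R k g → Spec_solve R k g (solve R k g)

-- ===== LEMMAS AND PROOFS =====

-- proof-only helpers naming the two loop bodies and the memo table
def AStep (k : Int) (st : Int × List Int) (i : Int) : Int × List Int :=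
  let p := innerA k (PySem.List.enumerate st.2 0) 0 i
  (st.1 + p.1, PySem.List.slice st.2 (some p.2) none ++ PySem.List.slice st.2 none (some p.2))

def Fe (k : Int) (g : List Int) (off : Int) : Int :=
  (rowScan k (PySem.List.enumerate (PySem.List.slice g (some off) none ++ PySem.List.slice g none (some off)) 0) 0).1

def Fn (k : Int) (g : List Int) (off : Int) : Int :=
  PySem.Int.mod (off + ((rowScan k (PySem.List.enumerate (PySem.List.slice g (some off) none ++ PySem.List.slice g none (some off)) 0) 0).2.getD ((g.length : Int) - 1))) (g.length : Int)

def BTab (k : Int) (g : List Int) : List Int × List Int :=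
  (PySem.List.pyRange 0 (g.length : Int) 1).foldl (fun (t : List Int × List Int) off =>
      let row := PySem.List.slice g (some off) none ++ PySem.List.slice g none (some off)
      let p := rowScan k (PySem.List.enumerate row 0) 0
      let i := p.2.getD ((g.length : Int) - 1)
      (t.1 ++ [p.1], t.2 ++ [PySem.Int.mod (off + i) (g.length : Int)])) ([], [])

def BStep (k : Int) (g : List Int) (st : Int × Int) (x : Int) : Int × Int :=
  (st.1 + PySem.List.pyGetD (BTab k g).1 st.2 0, PySem.List.pyGetD (BTab k g).2 st.2 0)

def lastFst (l : List (Int × Int)) (d : Int) : Int :=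
  match l.getLast? with | some p => p.1 | none => d

lemma solve_eq (R k : Int) (g : List Int) :
    solve R k g = ((PySem.List.pyRange 0 R 1).foldl (AStep k) (0, g)).1 := rfl

lemma solve_alt_eq (R k : Int) (g : List Int) :
    solve_alt R k g = if g.length = 0 ∨ R ≤ 0 then 0
      else ((PySem.List.pyRange 0 R 1).foldl (BStep k g) ((0 : Int), (0 : Int))).1 := rfl

lemma innerA_eq (k : Int) : ∀ (l : List (Int × Int)) (s i0 : Int),
    innerA k l s i0 = ((rowScan k l s).1, (rowScan k l s).2.getD (lastFst l i0)) := by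
  intro l
  induction l with
  | nil => intro s i0; simp [innerA, rowScan, lastFst]
  | cons p rest ih =>
    intro s i0
    obtain ⟨j, x⟩ := p
    by_cases hb : s + x > k
    · simp [innerA, rowScan, hb]
    · simp only [innerA, rowScan, if_neg hb, ih]
      congr 1
      cases hr : rest with
      | nil => simp [lastFst]
      | cons q t =>
        cases hl : (q :: t).getLast? with
        | none => simp [List.getLast?_eq_none_iff] at hl
        | some p => simp [lastFst, hl]

lemma lastFst_enumerate (h : List Int) : ∀ (s d : Int),
    lastFst (PySem.List.enumerate h s) d = if h = [] then d else s + h.length - 1 := by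
  induction h with
  | nil => intro s d; simp [PySem.List.enumerate_nil, lastFst]
  | cons y t ih =>
    intro s d
    rw [PySem.List.enumerate_cons]
    cases ht : t with
    | nil => simp [lastFst, PySem.List.enumerate_nil]
    | cons z u =>
      have h1 := ih (s + 1) d
      rw [ht] at h1
      have h2 : lastFst (PySem.List.enumerate (z :: u) (s + 1)) d
          = s + 1 + (z :: u).length - 1 := by rw [h1]; simp
      unfold lastFst at h2 ⊢
      rw [PySem.List.enumerate_cons, List.getLast?_cons_cons, ← PySem.List.enumerate_cons, h2]
      simp
      omega

lemma rowScan_break_mem (k : Int) : ∀ (l : List (Int × Int)) (s j : Int),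
    (rowScan k l s).2 = some j → j ∈ l.map Prod.fst := by
  intro l
  induction l with
  | nil => intro s j h; simp [rowScan] at h
  | cons p rest ih =>
    intro s j h
    obtain ⟨i, x⟩ := p
    by_cases hb : s + x > k
    · simp [rowScan, hb] at h
      simp [h]
    · simp only [rowScan, if_neg hb] at h
      simpa using Or.inr (ih _ _ h)

lemma rowScan_enum_bounds (k : Int) (h : List Int) (j : Int)
    (hb : (rowScan k (PySem.List.enumerate h 0) 0).2 = some j) : 0 ≤ j ∧ j < h.length := by
  have hm := rowScan_break_mem k _ _ _ hb
  rw [PySem.List.map_fst_enumerate] at hm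
  rw [PySem.List.mem_pyRange_one] at hm
  omega

lemma slice_rot (g : List Int) (off : Nat) (hoff : off ≤ g.length) :
    PySem.List.slice g (some (off : Int)) none ++ PySem.List.slice g none (some (off : Int))
      = g.rotate off := by
  rw [PySem.List.slice_from_natCast, PySem.List.slice_to_natCast,
      List.rotate_eq_drop_append_take hoff]

lemma Fn_bounds (k : Int) (g : List Int) (hg : 0 < g.length) (off : Int) :
    0 ≤ Fn k g off ∧ Fn k g off < g.length := by
  have hn : (0 : Int) < (g.length : Int) := by exact_mod_cast hg
  unfold Fn
  rw [PySem.Int.mod_eq_emod_of_pos hn]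
  exact ⟨Int.emod_nonneg _ (by omega), Int.emod_lt_of_pos _ hn⟩

lemma step_A (k : Int) (g : List Int) (hg : 0 < g.length) (off : Nat) (hoff : off < g.length)
    (e i0 : Int) :
    AStep k (e, g.rotate off) i0 = (e + Fe k g off, g.rotate (Fn k g off).toNat) := by
  have hle : off ≤ g.length := Nat.le_of_lt hoff
  have hrl : (g.rotate off).length = g.length := List.length_rotate g off
  have hrow : g.rotate off ≠ [] := by
    intro h; rw [h] at hrl; simp at hrl; omega
  have hFe : Fe k g off = (rowScan k (PySem.List.enumerate (g.rotate off) 0) 0).1 := by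
    unfold Fe; rw [slice_rot g off hle]
  have hFn : Fn k g off = PySem.Int.mod
      ((off : Int) + ((rowScan k (PySem.List.enumerate (g.rotate off) 0) 0).2.getD
        ((g.length : Int) - 1))) (g.length : Int) := by
    unfold Fn; rw [slice_rot g off hle]
  set rs := rowScan k (PySem.List.enumerate (g.rotate off) 0) 0 with hrs
  -- the carried index computed by A's inner loop
  have hlast : lastFst (PySem.List.enumerate (g.rotate off) 0) i0 = (g.length : Int) - 1 := by
    rw [lastFst_enumerate, if_neg hrow, hrl]; omega
  have hstep : AStep k (e, g.rotate off) i0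
      = (e + rs.1, PySem.List.slice (g.rotate off) (some (rs.2.getD ((g.length : Int) - 1))) none
          ++ PySem.List.slice (g.rotate off) none (some (rs.2.getD ((g.length : Int) - 1)))) := by
    unfold AStep
    rw [innerA_eq, hlast]
  set i' : Int := rs.2.getD ((g.length : Int) - 1) with hi'
  have hib : 0 ≤ i' ∧ i' < g.length := by
    cases hr2 : rs.2 with
    | none => simp [hi', hr2]; omega
    | some j =>
      have := rowScan_enum_bounds k (g.rotate off) j (by rw [← hrs, hr2])
      rw [hrl] at this
      simp [hi', hr2]
      omega
  have hi'nat : ((i'.toNat : Nat) : Int) = i' := Int.toNat_of_nonneg hib.1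
  have hislice : PySem.List.slice (g.rotate off) (some i') none
      ++ PySem.List.slice (g.rotate off) none (some i')
      = (g.rotate off).rotate i'.toNat := by
    rw [← hi'nat]
    exact slice_rot (g.rotate off) i'.toNat (by rw [hrl]; omega)
  rw [hstep, hislice, hFe, hFn]
  have hmod : (PySem.Int.mod ((off : Int) + i') (g.length : Int)).toNat
      = (off + i'.toNat) % g.length := by
    have hn : (0 : Int) < (g.length : Int) := by exact_mod_cast hg
    rw [PySem.Int.mod_eq_emod_of_pos hn]
    have : (off : Int) + i' = ((off + i'.toNat : Nat) : Int) := by push_cast [hi'nat]; ring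
    rw [this]
    rw [← Int.natCast_mod]
    exact Int.toNat_natCast _
  rw [List.rotate_rotate, hmod, List.rotate_mod]

lemma foldl_pair_append (f h : Int → Int) : ∀ (l : List Int) (a b : List Int),
    l.foldl (fun t o => (t.1 ++ [f o], t.2 ++ [h o])) (a, b) = (a ++ l.map f, b ++ l.map h) := by
  intro l
  induction l with
  | nil => intro a b; simp
  | cons x t ih =>
    intro a b
    simp only [List.foldl_cons, List.map_cons, ih]
    simp

lemma BTab_eq (k : Int) (g : List Int) :
    BTab k g = ((PySem.List.pyRange 0 (g.length : Int) 1).map (Fe k g),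
                (PySem.List.pyRange 0 (g.length : Int) 1).map (Fn k g)) := by
  have := foldl_pair_append (Fe k g) (Fn k g) (PySem.List.pyRange 0 (g.length : Int) 1) [] []
  simp only [List.nil_append] at this
  exact this

lemma step_B (k : Int) (g : List Int) (off : Nat) (hoff : off < g.length) (e x : Int) :
    BStep k g (e, (off : Int)) x = (e + Fe k g off, Fn k g off) := by
  have h0 : (0 : Int) ≤ (off : Int) := by positivity
  have h1 : (off : Int) < (g.length : Int) := by exact_mod_cast hoff
  unfold BStep
  rw [BTab_eq]
  rw [PySem.List.pyGetD_map_pyRange_of_nonneg (Fe k g) (g.length : Int) (off : Int) 0 h0 h1,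
      PySem.List.pyGetD_map_pyRange_of_nonneg (Fn k g) (g.length : Int) (off : Int) 0 h0 h1]

lemma main_fold (k : Int) (g : List Int) (hg : 0 < g.length) : ∀ (l : List Int) (e : Int)
    (off : Nat), off < g.length →
    (l.foldl (AStep k) (e, g.rotate off)).1 = (l.foldl (BStep k g) (e, (off : Int))).1 := by
  intro l
  induction l with
  | nil => intro e off _; simp
  | cons x t ih =>
    intro e off hoff
    have hb := Fn_bounds k g hg (off : Int)
    simp only [List.foldl_cons]
    rw [step_A k g hg off hoff e x, step_B k g off hoff e x]
    have hlt : (Fn k g (off : Int)).toNat < g.length := by omega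
    have := ih (e + Fe k g (off : Int)) (Fn k g (off : Int)).toNat hlt
    rw [Int.toNat_of_nonneg hb.1] at this
    exact this

lemma empty_fold (k : Int) : ∀ (l : List Int) (e : Int),
    l.foldl (AStep k) (e, ([] : List Int)) = (e, []) := by
  intro l
  induction l with
  | nil => intro e; rfl
  | cons x t ih =>
    intro e
    have h1 : AStep k (e, ([] : List Int)) x = (e, []) := by
      unfold AStep
      simp [PySem.List.enumerate_nil, innerA, PySem.List.slice]
    rw [List.foldl_cons, h1, ih]

-- ===== VERDICT (by name: the statement is the Claim_ definition above) =====
theorem solve_spec : Claim_equal_solve := by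
  intro R k g _
  unfold Spec_solve
  rw [solve_eq, solve_alt_eq]
  by_cases hR : R ≤ 0
  · simp [PySem.List.pyRange_one_eq_nil hR, hR]
  · by_cases hg : g.length = 0
    · rw [List.length_eq_zero_iff] at hg
      subst hg
      simp [empty_fold]
    · have hglen : 0 < g.length := Nat.pos_of_ne_zero hg
      rw [if_neg (fun hc => hc.elim hg hR)]
      have := main_fold k g hglen (PySem.List.pyRange 0 R 1) 0 0 hglen
      simpa [List.rotate_zero] using this
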